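-- pv_equiv track=rewrite | github.com/calvinw/mcp-ui-servers | mcp-strudel/parse_synths_drums.py | categorize_gm_instrument
-- ===== SOURCE A (Python) =====
-- def categorize_gm_instrument(name):
--     """Categorize GM instrument by family."""
--
--     categories = {
--         'Keyboards': [
--             'gm_piano', 'gm_epiano1', 'gm_epiano2', 'gm_harpsichord', 'gm_clavinet',
--             'gm_celesta', 'gm_glockenspiel', 'gm_music_box', 'gm_vibraphone',
--             'gm_marimba', 'gm_xylophone', 'gm_tubular_bells', 'gm_dulcimer'
--         ],
--         'Organs': [
--             'gm_drawbar_organ', 'gm_percussive_organ', 'gm_rock_organ', 'gm_church_organ',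
--             'gm_reed_organ', 'gm_accordion', 'gm_harmonica', 'gm_bandoneon'
--         ],
--         'Guitars': [
--             'gm_acoustic_guitar_nylon', 'gm_acoustic_guitar_steel', 'gm_electric_guitar_jazz',
--             'gm_electric_guitar_clean', 'gm_electric_guitar_muted', 'gm_overdriven_guitar',
--             'gm_distortion_guitar', 'gm_guitar_harmonics', 'gm_guitar_fret_noise'
--         ],
--         'Bass': [
--             'gm_acoustic_bass', 'gm_electric_bass_finger', 'gm_electric_bass_pick',
--             'gm_fretless_bass', 'gm_slap_bass_1', 'gm_slap_bass_2', 'gm_synth_bass_1',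
--             'gm_synth_bass_2'
--         ],
--         'Strings': [
--             'gm_violin', 'gm_viola', 'gm_cello', 'gm_contrabass', 'gm_tremolo_strings',
--             'gm_pizzicato_strings', 'gm_orchestral_harp', 'gm_timpani', 'gm_string_ensemble_1',
--             'gm_string_ensemble_2', 'gm_synth_strings_1', 'gm_synth_strings_2'
--         ],
--         'Brass': [
--             'gm_trumpet', 'gm_trombone', 'gm_tuba', 'gm_muted_trumpet', 'gm_french_horn',
--             'gm_brass_section', 'gm_synth_brass_1', 'gm_synth_brass_2'
--         ],
--         'Woodwinds': [
--             'gm_soprano_sax', 'gm_alto_sax', 'gm_tenor_sax', 'gm_baritone_sax',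
--             'gm_oboe', 'gm_english_horn', 'gm_bassoon', 'gm_clarinet', 'gm_piccolo',
--             'gm_flute', 'gm_recorder', 'gm_pan_flute', 'gm_blown_bottle', 'gm_shakuhachi',
--             'gm_whistle', 'gm_ocarina'
--         ],
--         'Vocals': [
--             'gm_choir_aahs', 'gm_voice_oohs', 'gm_synth_choir'
--         ],
--         'Ethnic': [
--             'gm_sitar', 'gm_banjo', 'gm_shamisen', 'gm_koto', 'gm_kalimba',
--             'gm_bagpipe', 'gm_fiddle', 'gm_shanai', 'gm_steel_drums', 'gm_taiko_drum'
--         ],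
--         'Percussion': [
--             'gm_agogo', 'gm_woodblock', 'gm_melodic_tom', 'gm_synth_drum',
--             'gm_reverse_cymbal', 'gm_tinkle_bell'
--         ],
--         'Synth Leads': [
--             'gm_lead_1_square', 'gm_lead_2_sawtooth', 'gm_lead_3_calliope',
--             'gm_lead_4_chiff', 'gm_lead_5_charang', 'gm_lead_6_voice',
--             'gm_lead_7_fifths', 'gm_lead_8_bass_lead'
--         ],
--         'Synth Pads': [
--             'gm_pad_new_age', 'gm_pad_warm', 'gm_pad_poly', 'gm_pad_choir',
--             'gm_pad_bowed', 'gm_pad_metallic', 'gm_pad_halo', 'gm_pad_sweep'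
--         ],
--         'Sound Effects': [
--             'gm_fx_rain', 'gm_fx_soundtrack', 'gm_fx_crystal', 'gm_fx_atmosphere',
--             'gm_fx_brightness', 'gm_fx_goblins', 'gm_fx_echoes', 'gm_fx_sci_fi',
--             'gm_bird_tweet', 'gm_telephone', 'gm_helicopter', 'gm_applause',
--             'gm_gunshot', 'gm_seashore', 'gm_breath_noise', 'gm_orchestra_hit'
--         ]
--     }
--
--     for category, instruments in categories.items():
--         if name in instruments:
--             return category
--
--     return 'Other'
-- ===== SOURCE B (Python) =====
-- # Flat instrument -> family mapping written out directly; lookup is a single dict .get.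
-- _GM_FAMILY = {
--     'gm_piano': 'Keyboards',
--     'gm_epiano1': 'Keyboards',
--     'gm_epiano2': 'Keyboards',
--     'gm_harpsichord': 'Keyboards',
--     'gm_clavinet': 'Keyboards',
--     'gm_celesta': 'Keyboards',
--     'gm_glockenspiel': 'Keyboards',
--     'gm_music_box': 'Keyboards',
--     'gm_vibraphone': 'Keyboards',
--     'gm_marimba': 'Keyboards',
--     'gm_xylophone': 'Keyboards',
--     'gm_tubular_bells': 'Keyboards',
--     'gm_dulcimer': 'Keyboards',
--     'gm_drawbar_organ': 'Organs',
--     'gm_percussive_organ': 'Organs',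
--     'gm_rock_organ': 'Organs',
--     'gm_church_organ': 'Organs',
--     'gm_reed_organ': 'Organs',
--     'gm_accordion': 'Organs',
--     'gm_harmonica': 'Organs',
--     'gm_bandoneon': 'Organs',
--     'gm_acoustic_guitar_nylon': 'Guitars',
--     'gm_acoustic_guitar_steel': 'Guitars',
--     'gm_electric_guitar_jazz': 'Guitars',
--     'gm_electric_guitar_clean': 'Guitars',
--     'gm_electric_guitar_muted': 'Guitars',
--     'gm_overdriven_guitar': 'Guitars',
--     'gm_distortion_guitar': 'Guitars',
--     'gm_guitar_harmonics': 'Guitars',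
--     'gm_guitar_fret_noise': 'Guitars',
--     'gm_acoustic_bass': 'Bass',
--     'gm_electric_bass_finger': 'Bass',
--     'gm_electric_bass_pick': 'Bass',
--     'gm_fretless_bass': 'Bass',
--     'gm_slap_bass_1': 'Bass',
--     'gm_slap_bass_2': 'Bass',
--     'gm_synth_bass_1': 'Bass',
--     'gm_synth_bass_2': 'Bass',
--     'gm_violin': 'Strings',
--     'gm_viola': 'Strings',
--     'gm_cello': 'Strings',
--     'gm_contrabass': 'Strings',
--     'gm_tremolo_strings': 'Strings',
--     'gm_pizzicato_strings': 'Strings',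
--     'gm_orchestral_harp': 'Strings',
--     'gm_timpani': 'Strings',
--     'gm_string_ensemble_1': 'Strings',
--     'gm_string_ensemble_2': 'Strings',
--     'gm_synth_strings_1': 'Strings',
--     'gm_synth_strings_2': 'Strings',
--     'gm_trumpet': 'Brass',
--     'gm_trombone': 'Brass',
--     'gm_tuba': 'Brass',
--     'gm_muted_trumpet': 'Brass',
--     'gm_french_horn': 'Brass',
--     'gm_brass_section': 'Brass',
--     'gm_synth_brass_1': 'Brass',
--     'gm_synth_brass_2': 'Brass',
--     'gm_soprano_sax': 'Woodwinds',
--     'gm_alto_sax': 'Woodwinds',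
--     'gm_tenor_sax': 'Woodwinds',
--     'gm_baritone_sax': 'Woodwinds',
--     'gm_oboe': 'Woodwinds',
--     'gm_english_horn': 'Woodwinds',
--     'gm_bassoon': 'Woodwinds',
--     'gm_clarinet': 'Woodwinds',
--     'gm_piccolo': 'Woodwinds',
--     'gm_flute': 'Woodwinds',
--     'gm_recorder': 'Woodwinds',
--     'gm_pan_flute': 'Woodwinds',
--     'gm_blown_bottle': 'Woodwinds',
--     'gm_shakuhachi': 'Woodwinds',
--     'gm_whistle': 'Woodwinds',
--     'gm_ocarina': 'Woodwinds',
--     'gm_choir_aahs': 'Vocals',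
--     'gm_voice_oohs': 'Vocals',
--     'gm_synth_choir': 'Vocals',
--     'gm_sitar': 'Ethnic',
--     'gm_banjo': 'Ethnic',
--     'gm_shamisen': 'Ethnic',
--     'gm_koto': 'Ethnic',
--     'gm_kalimba': 'Ethnic',
--     'gm_bagpipe': 'Ethnic',
--     'gm_fiddle': 'Ethnic',
--     'gm_shanai': 'Ethnic',
--     'gm_steel_drums': 'Ethnic',
--     'gm_taiko_drum': 'Ethnic',
--     'gm_agogo': 'Percussion',
--     'gm_woodblock': 'Percussion',
--     'gm_melodic_tom': 'Percussion',
--     'gm_synth_drum': 'Percussion',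
--     'gm_reverse_cymbal': 'Percussion',
--     'gm_tinkle_bell': 'Percussion',
--     'gm_lead_1_square': 'Synth Leads',
--     'gm_lead_2_sawtooth': 'Synth Leads',
--     'gm_lead_3_calliope': 'Synth Leads',
--     'gm_lead_4_chiff': 'Synth Leads',
--     'gm_lead_5_charang': 'Synth Leads',
--     'gm_lead_6_voice': 'Synth Leads',
--     'gm_lead_7_fifths': 'Synth Leads',
--     'gm_lead_8_bass_lead': 'Synth Leads',
--     'gm_pad_new_age': 'Synth Pads',
--     'gm_pad_warm': 'Synth Pads',
--     'gm_pad_poly': 'Synth Pads',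
--     'gm_pad_choir': 'Synth Pads',
--     'gm_pad_bowed': 'Synth Pads',
--     'gm_pad_metallic': 'Synth Pads',
--     'gm_pad_halo': 'Synth Pads',
--     'gm_pad_sweep': 'Synth Pads',
--     'gm_fx_rain': 'Sound Effects',
--     'gm_fx_soundtrack': 'Sound Effects',
--     'gm_fx_crystal': 'Sound Effects',
--     'gm_fx_atmosphere': 'Sound Effects',
--     'gm_fx_brightness': 'Sound Effects',
--     'gm_fx_goblins': 'Sound Effects',
--     'gm_fx_echoes': 'Sound Effects',
--     'gm_fx_sci_fi': 'Sound Effects',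
--     'gm_bird_tweet': 'Sound Effects',
--     'gm_telephone': 'Sound Effects',
--     'gm_helicopter': 'Sound Effects',
--     'gm_applause': 'Sound Effects',
--     'gm_gunshot': 'Sound Effects',
--     'gm_seashore': 'Sound Effects',
--     'gm_breath_noise': 'Sound Effects',
--     'gm_orchestra_hit': 'Sound Effects',
-- }
--
--
-- def categorize_gm_instrument(name):
--     """Categorize GM instrument by family."""
--     return _GM_FAMILY.get(name, 'Other')
-- ===== Notes on version B (the rewrite author's own statement) =====
-- stated objective: idiomatic
-- what changed: Replaces the per-call scan over grouped category lists with a flat instrument-to-family dict written out directly, so the function is a single dict .get with no loop or nested lists.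
import Mathlib
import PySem

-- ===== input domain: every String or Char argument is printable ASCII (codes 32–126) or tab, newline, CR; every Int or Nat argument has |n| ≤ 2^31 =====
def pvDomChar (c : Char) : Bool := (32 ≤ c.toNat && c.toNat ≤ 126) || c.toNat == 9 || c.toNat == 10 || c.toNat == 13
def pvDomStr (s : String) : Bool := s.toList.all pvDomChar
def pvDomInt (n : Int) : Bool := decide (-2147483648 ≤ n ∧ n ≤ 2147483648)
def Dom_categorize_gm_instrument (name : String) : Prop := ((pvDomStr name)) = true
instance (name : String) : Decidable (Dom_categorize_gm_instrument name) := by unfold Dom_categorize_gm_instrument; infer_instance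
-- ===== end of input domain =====

-- B replaces A's per-call scan over grouped category lists by a flat
-- instrument→family dict written out directly, looked up with a single .get (idiomatic; same result).

-- ===== PORT A =====
-- A's table of categories, verbatim.
def gmCategories : List (String × List String) := [
  ("Keyboards", ["gm_piano", "gm_epiano1", "gm_epiano2", "gm_harpsichord", "gm_clavinet", "gm_celesta", "gm_glockenspiel", "gm_music_box", "gm_vibraphone", "gm_marimba", "gm_xylophone", "gm_tubular_bells", "gm_dulcimer"]),
  ("Organs", ["gm_drawbar_organ", "gm_percussive_organ", "gm_rock_organ", "gm_church_organ", "gm_reed_organ", "gm_accordion", "gm_harmonica", "gm_bandoneon"]),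
  ("Guitars", ["gm_acoustic_guitar_nylon", "gm_acoustic_guitar_steel", "gm_electric_guitar_jazz", "gm_electric_guitar_clean", "gm_electric_guitar_muted", "gm_overdriven_guitar", "gm_distortion_guitar", "gm_guitar_harmonics", "gm_guitar_fret_noise"]),
  ("Bass", ["gm_acoustic_bass", "gm_electric_bass_finger", "gm_electric_bass_pick", "gm_fretless_bass", "gm_slap_bass_1", "gm_slap_bass_2", "gm_synth_bass_1", "gm_synth_bass_2"]),
  ("Strings", ["gm_violin", "gm_viola", "gm_cello", "gm_contrabass", "gm_tremolo_strings", "gm_pizzicato_strings", "gm_orchestral_harp", "gm_timpani", "gm_string_ensemble_1", "gm_string_ensemble_2", "gm_synth_strings_1", "gm_synth_strings_2"]),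
  ("Brass", ["gm_trumpet", "gm_trombone", "gm_tuba", "gm_muted_trumpet", "gm_french_horn", "gm_brass_section", "gm_synth_brass_1", "gm_synth_brass_2"]),
  ("Woodwinds", ["gm_soprano_sax", "gm_alto_sax", "gm_tenor_sax", "gm_baritone_sax", "gm_oboe", "gm_english_horn", "gm_bassoon", "gm_clarinet", "gm_piccolo", "gm_flute", "gm_recorder", "gm_pan_flute", "gm_blown_bottle", "gm_shakuhachi", "gm_whistle", "gm_ocarina"]),
  ("Vocals", ["gm_choir_aahs", "gm_voice_oohs", "gm_synth_choir"]),
  ("Ethnic", ["gm_sitar", "gm_banjo", "gm_shamisen", "gm_koto", "gm_kalimba", "gm_bagpipe", "gm_fiddle", "gm_shanai", "gm_steel_drums", "gm_taiko_drum"]),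
  ("Percussion", ["gm_agogo", "gm_woodblock", "gm_melodic_tom", "gm_synth_drum", "gm_reverse_cymbal", "gm_tinkle_bell"]),
  ("Synth Leads", ["gm_lead_1_square", "gm_lead_2_sawtooth", "gm_lead_3_calliope", "gm_lead_4_chiff", "gm_lead_5_charang", "gm_lead_6_voice", "gm_lead_7_fifths", "gm_lead_8_bass_lead"]),
  ("Synth Pads", ["gm_pad_new_age", "gm_pad_warm", "gm_pad_poly", "gm_pad_choir", "gm_pad_bowed", "gm_pad_metallic", "gm_pad_halo", "gm_pad_sweep"]),
  ("Sound Effects", ["gm_fx_rain", "gm_fx_soundtrack", "gm_fx_crystal", "gm_fx_atmosphere", "gm_fx_brightness", "gm_fx_goblins", "gm_fx_echoes", "gm_fx_sci_fi", "gm_bird_tweet", "gm_telephone", "gm_helicopter", "gm_applause", "gm_gunshot", "gm_seashore", "gm_breath_noise", "gm_orchestra_hit"])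
]

-- A's loop: for category, instruments in categories.items(): if name in instruments: return category
def gmScanA (name : String) : List (String × List String) → String
  | [] => "Other"
  | (category, instruments) :: rest =>
      if instruments.contains name then category else gmScanA name rest

def categorize_gm_instrument (name : String) : String :=
  gmScanA name gmCategories

-- ===== PORT B =====
-- B's flat dict literal (unique keys, so dict lookup = first match on the assoc list).
def gmFlat : List (String × String) := [
  ("gm_piano", "Keyboards"),
  ("gm_epiano1", "Keyboards"),
  ("gm_epiano2", "Keyboards"),
  ("gm_harpsichord", "Keyboards"),
  ("gm_clavinet", "Keyboards"),
  ("gm_celesta", "Keyboards"),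
  ("gm_glockenspiel", "Keyboards"),
  ("gm_music_box", "Keyboards"),
  ("gm_vibraphone", "Keyboards"),
  ("gm_marimba", "Keyboards"),
  ("gm_xylophone", "Keyboards"),
  ("gm_tubular_bells", "Keyboards"),
  ("gm_dulcimer", "Keyboards"),
  ("gm_drawbar_organ", "Organs"),
  ("gm_percussive_organ", "Organs"),
  ("gm_rock_organ", "Organs"),
  ("gm_church_organ", "Organs"),
  ("gm_reed_organ", "Organs"),
  ("gm_accordion", "Organs"),
  ("gm_harmonica", "Organs"),
  ("gm_bandoneon", "Organs"),
  ("gm_acoustic_guitar_nylon", "Guitars"),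
  ("gm_acoustic_guitar_steel", "Guitars"),
  ("gm_electric_guitar_jazz", "Guitars"),
  ("gm_electric_guitar_clean", "Guitars"),
  ("gm_electric_guitar_muted", "Guitars"),
  ("gm_overdriven_guitar", "Guitars"),
  ("gm_distortion_guitar", "Guitars"),
  ("gm_guitar_harmonics", "Guitars"),
  ("gm_guitar_fret_noise", "Guitars"),
  ("gm_acoustic_bass", "Bass"),
  ("gm_electric_bass_finger", "Bass"),
  ("gm_electric_bass_pick", "Bass"),
  ("gm_fretless_bass", "Bass"),
  ("gm_slap_bass_1", "Bass"),
  ("gm_slap_bass_2", "Bass"),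
  ("gm_synth_bass_1", "Bass"),
  ("gm_synth_bass_2", "Bass"),
  ("gm_violin", "Strings"),
  ("gm_viola", "Strings"),
  ("gm_cello", "Strings"),
  ("gm_contrabass", "Strings"),
  ("gm_tremolo_strings", "Strings"),
  ("gm_pizzicato_strings", "Strings"),
  ("gm_orchestral_harp", "Strings"),
  ("gm_timpani", "Strings"),
  ("gm_string_ensemble_1", "Strings"),
  ("gm_string_ensemble_2", "Strings"),
  ("gm_synth_strings_1", "Strings"),
  ("gm_synth_strings_2", "Strings"),
  ("gm_trumpet", "Brass"),
  ("gm_trombone", "Brass"),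
  ("gm_tuba", "Brass"),
  ("gm_muted_trumpet", "Brass"),
  ("gm_french_horn", "Brass"),
  ("gm_brass_section", "Brass"),
  ("gm_synth_brass_1", "Brass"),
  ("gm_synth_brass_2", "Brass"),
  ("gm_soprano_sax", "Woodwinds"),
  ("gm_alto_sax", "Woodwinds"),
  ("gm_tenor_sax", "Woodwinds"),
  ("gm_baritone_sax", "Woodwinds"),
  ("gm_oboe", "Woodwinds"),
  ("gm_english_horn", "Woodwinds"),
  ("gm_bassoon", "Woodwinds"),
  ("gm_clarinet", "Woodwinds"),
  ("gm_piccolo", "Woodwinds"),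
  ("gm_flute", "Woodwinds"),
  ("gm_recorder", "Woodwinds"),
  ("gm_pan_flute", "Woodwinds"),
  ("gm_blown_bottle", "Woodwinds"),
  ("gm_shakuhachi", "Woodwinds"),
  ("gm_whistle", "Woodwinds"),
  ("gm_ocarina", "Woodwinds"),
  ("gm_choir_aahs", "Vocals"),
  ("gm_voice_oohs", "Vocals"),
  ("gm_synth_choir", "Vocals"),
  ("gm_sitar", "Ethnic"),
  ("gm_banjo", "Ethnic"),
  ("gm_shamisen", "Ethnic"),
  ("gm_koto", "Ethnic"),
  ("gm_kalimba", "Ethnic"),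
  ("gm_bagpipe", "Ethnic"),
  ("gm_fiddle", "Ethnic"),
  ("gm_shanai", "Ethnic"),
  ("gm_steel_drums", "Ethnic"),
  ("gm_taiko_drum", "Ethnic"),
  ("gm_agogo", "Percussion"),
  ("gm_woodblock", "Percussion"),
  ("gm_melodic_tom", "Percussion"),
  ("gm_synth_drum", "Percussion"),
  ("gm_reverse_cymbal", "Percussion"),
  ("gm_tinkle_bell", "Percussion"),
  ("gm_lead_1_square", "Synth Leads"),
  ("gm_lead_2_sawtooth", "Synth Leads"),
  ("gm_lead_3_calliope", "Synth Leads"),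
  ("gm_lead_4_chiff", "Synth Leads"),
  ("gm_lead_5_charang", "Synth Leads"),
  ("gm_lead_6_voice", "Synth Leads"),
  ("gm_lead_7_fifths", "Synth Leads"),
  ("gm_lead_8_bass_lead", "Synth Leads"),
  ("gm_pad_new_age", "Synth Pads"),
  ("gm_pad_warm", "Synth Pads"),
  ("gm_pad_poly", "Synth Pads"),
  ("gm_pad_choir", "Synth Pads"),
  ("gm_pad_bowed", "Synth Pads"),
  ("gm_pad_metallic", "Synth Pads"),
  ("gm_pad_halo", "Synth Pads"),
  ("gm_pad_sweep", "Synth Pads"),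
  ("gm_fx_rain", "Sound Effects"),
  ("gm_fx_soundtrack", "Sound Effects"),
  ("gm_fx_crystal", "Sound Effects"),
  ("gm_fx_atmosphere", "Sound Effects"),
  ("gm_fx_brightness", "Sound Effects"),
  ("gm_fx_goblins", "Sound Effects"),
  ("gm_fx_echoes", "Sound Effects"),
  ("gm_fx_sci_fi", "Sound Effects"),
  ("gm_bird_tweet", "Sound Effects"),
  ("gm_telephone", "Sound Effects"),
  ("gm_helicopter", "Sound Effects"),
  ("gm_applause", "Sound Effects"),
  ("gm_gunshot", "Sound Effects"),
  ("gm_seashore", "Sound Effects"),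
  ("gm_breath_noise", "Sound Effects"),
  ("gm_orchestra_hit", "Sound Effects")]


-- _GM_FAMILY.get(name, 'Other'): first-match lookup on the flat literal (keys are distinct).
def categorize_gm_instrument_alt (name : String) : String :=
  match gmFlat.find? (fun p => p.1 == name) with
  | some p => p.2
  | none => "Other"

-- ===== PRECONDITION & SPEC =====
def Spec_categorize_gm_instrument (name : String) (out : String) : Prop := out = categorize_gm_instrument_alt name
instance (name : String) (out : String) : Decidable (Spec_categorize_gm_instrument name out) := by unfold Spec_categorize_gm_instrument; infer_instance

-- ===== CLAIM =====
def Claim_equal_categorize_gm_instrument : Prop := ∀ (name : String), Dom_categorize_gm_instrument name → Spec_categorize_gm_instrument name (categorize_gm_instrument name)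

-- ===== LEMMAS AND PROOFS =====

-- Flattening A's grouped table yields an assoc list on which first-match lookup
-- agrees with A's scan.
theorem gmFind_map (name c : String) (insts : List String) :
    (insts.map (fun i => (i, c))).find? (fun q => q.1 == name)
      = if name ∈ insts then some (name, c) else none := by
  induction insts with
  | nil => rfl
  | cons i t ih =>
      by_cases hi : i = name
      · subst hi; simp
      · have hb : (i == name) = false := beq_eq_false_iff_ne.mpr hi
        simp [hb, ih, Ne.symm hi]

theorem gmScanA_eq_flat_lookup (name : String) (table : List (String × List String)) :
    gmScanA name table
      = (match (table.flatMap (fun p => p.2.map (fun i => (i, p.1)))).find?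
              (fun q => q.1 == name) with
         | some q => q.2
         | none => "Other") := by
  induction table with
  | nil => rfl
  | cons p rest ih =>
      obtain ⟨c, insts⟩ := p
      rw [List.flatMap_cons, List.find?_append, gmFind_map]
      by_cases hm : name ∈ insts
      · simp [gmScanA, hm]
      · simp only [gmScanA, hm, List.contains_eq_mem, decide_eq_true_eq,
          if_false, Option.none_or]
        simpa [hm] using ih

-- B's flat literal is exactly the flattening of A's table.
theorem gmFlat_eq : gmFlat = gmCategories.flatMap (fun p => p.2.map (fun i => (i, p.1))) := by rfl

-- ===== VERDICT =====
theorem categorize_gm_instrument_spec : Claim_equal_categorize_gm_instrument := by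
  intro name _
  unfold Spec_categorize_gm_instrument
  unfold categorize_gm_instrument categorize_gm_instrument_alt
  rw [gmFlat_eq, gmScanA_eq_flat_lookup]
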